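-- pv_equiv track=rewrite | github.com/Jeremynadal33/duckdb-sql-ctf | data_generator/src/data_generator/generators/scenario1_logs.py | split_flag
-- ===== SOURCE A (Python) =====
-- def split_flag(flag: str, n: int = 12) -> list[str]:
--     """Split flag into n roughly equal fragments."""
--     chunk_size = len(flag) // n
--     remainder = len(flag) % n
--     fragments: list[str] = []
--     offset = 0
--     for i in range(n):
--         size = chunk_size + (1 if i < remainder else 0)
--         fragments.append(flag[offset : offset + size])
--         offset += size
--     return fragments
-- ===== SOURCE B (Python) =====
-- def split_flag(flag: str, n: int = 12) -> list[str]: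
--     """Split flag into n roughly equal fragments."""
--     fragments: list[str] = []
--     rest = flag
--     while n > 0:
--         size = -(-len(rest) // n)  # ceil: the first remaining fragment takes the largest share
--         fragments.append(rest[:size])
--         rest = rest[size:]
--         n -= 1
--     return fragments
-- ===== Notes on version B (the rewrite author's own statement) =====
-- stated objective: alternative
-- what changed: Replaces A's loop with precomputed chunk_size/remainder and a running offset into the original string by a peel loop that repeatedly slices the ceil(len(rest)/n)-sized first fragment off the remaining string and decrements n, threading the shrinking string instead of an offset.
import Mathlib
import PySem

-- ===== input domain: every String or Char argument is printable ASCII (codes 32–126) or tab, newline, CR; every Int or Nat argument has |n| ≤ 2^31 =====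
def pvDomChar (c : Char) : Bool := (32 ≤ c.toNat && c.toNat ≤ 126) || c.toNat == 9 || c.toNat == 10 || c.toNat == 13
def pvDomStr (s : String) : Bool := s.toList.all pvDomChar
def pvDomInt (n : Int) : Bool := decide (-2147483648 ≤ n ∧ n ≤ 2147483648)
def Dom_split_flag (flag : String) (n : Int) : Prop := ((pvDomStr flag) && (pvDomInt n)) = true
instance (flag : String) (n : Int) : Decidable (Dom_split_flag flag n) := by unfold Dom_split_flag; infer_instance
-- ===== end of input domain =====

-- B replaces A's offset-accumulating loop by a peel loop: repeatedly slice the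
-- ceil(len(rest)/n)-sized first fragment off the remaining string and decrement n;
-- a different decomposition (no precomputed chunk_size/remainder pair, no offset).


-- ===== PORT A =====
def split_flag (flag : String) (n : Int) : List String :=
  let chunk_size := PySem.Int.floordiv (PySem.Str.len flag) n
  let remainder := PySem.Int.mod (PySem.Str.len flag) n
  let st := (PySem.List.pyRange 0 n 1).foldl
    (fun (st : List String × Int) i =>
      let size := chunk_size + (if i < remainder then 1 else 0)
      (st.1 ++ [PySem.Str.slice flag (some st.2) (some (st.2 + size))], st.2 + size))
    (([] : List String), 0)
  st.1

-- ===== PORT B =====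
-- Source B's 'while n > 0' peel loop, as structural recursion on n: each step takes the
-- ceil-division-sized prefix of the remaining string and continues with n-1.
def split_flag_alt (flag : String) (n : Int) : List String :=
  if n ≤ 0 then []
  else
    let size := -(PySem.Int.floordiv (-(PySem.Str.len flag)) n)
    PySem.Str.slice flag none (some size) ::
      split_flag_alt (PySem.Str.slice flag (some size) none) (n - 1)
termination_by n.toNat
decreasing_by simp_wf; omega

-- ===== PRECONDITION & SPEC =====
-- Pre_ excludes exactly n = 0, where Python A raises ZeroDivisionError.
def Pre_split_flag (flag : String) (n : Int) : Prop := n ≠ 0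
instance (flag : String) (n : Int) : Decidable (Pre_split_flag flag n) := by unfold Pre_split_flag; infer_instance
def pvWitness_split_flag : String × Int := ("flag{abc}", 3)

def Spec_split_flag (flag : String) (n : Int) (out : List String) : Prop := out = split_flag_alt flag n
instance (flag : String) (n : Int) (out : List String) : Decidable (Spec_split_flag flag n out) := by unfold Spec_split_flag; infer_instance

-- ===== CLAIM =====
def Claim_equal_split_flag : Prop := ∀ (flag : String) (n : Int), Dom_split_flag flag n → Pre_split_flag flag n → Spec_split_flag flag n (split_flag flag n)

-- ===== LEMMAS AND PROOFS =====

-- A's loop over range(m), started at offset 0, lands fragment k exactly at the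
-- closed-form boundary k*q + min(k, r).
lemma split_flag_fold (flag : String) (q r : Int) (hr : 0 ≤ r) :
    ∀ (m : Nat),
      ((List.range m).map (fun (k : Nat) => (k : Int))).foldl
        (fun (st : List String × Int) i =>
          let size := q + (if i < r then 1 else 0)
          (st.1 ++ [PySem.Str.slice flag (some st.2) (some (st.2 + size))], st.2 + size))
        (([] : List String), 0)
      = ((List.range m).map (fun (k : Nat) =>
            PySem.Str.slice flag (some ((k : Int) * q + min (k : Int) r))
              (some (((k : Int) + 1) * q + min ((k : Int) + 1) r))),
         (m : Int) * q + min (m : Int) r) := by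
  intro m
  induction m with
  | zero => simp [min_eq_left hr]
  | succ m ih =>
    rw [List.range_succ, List.map_append, List.foldl_append, ih]
    simp only [List.map_cons, List.map_nil, List.foldl_cons, List.foldl_nil,
      List.map_append]
    refine Prod.ext ?_ ?_
    · simp only
      congr 3
      simp only [Option.some.injEq]
      have h : (if (m : Int) < r then (1 : Int) else 0) = min (1 + (m : Int)) r - min (m : Int) r := by
        split_ifs <;> omega
      rw [h]; ring_nf
    · simp only
      have h : (if (m : Int) < r then (1 : Int) else 0) = min (1 + (m : Int)) r - min (m : Int) r := by
        split_ifs <;> omega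
      rw [h]; push_cast; ring_nf

-- slicing a suffix is slicing the original at shifted bounds
lemma slice_drop_comp (xs : List Char) (c a b : Int) (hc : 0 ≤ c) (ha : 0 ≤ a) (hb : 0 ≤ b) :
    PySem.List.slice (PySem.List.slice xs (some c) none) (some a) (some b)
      = PySem.List.slice xs (some (c + a)) (some (c + b)) := by
  rw [PySem.List.slice_from _ hc, PySem.List.slice_toNat _ ha hb,
      PySem.List.slice_toNat _ (by omega : (0:Int) ≤ c + a) (by omega : (0:Int) ≤ c + b), List.drop_drop]
  have h1 : c.toNat + a.toNat = (c + a).toNat := by omega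
  have h2 : b.toNat - a.toNat = (c + b).toNat - (c + a).toNat := by omega
  rw [h1, h2]

-- Python's -(-L // (m+1)) is q + min 1 r for q = L // (m+1), r = L % (m+1)
lemma ceil_div_eq (L : Int) (m : Nat) :
    -(PySem.Int.floordiv (-L) ((m : Int) + 1))
      = PySem.Int.floordiv L ((m : Int) + 1) + min 1 (PySem.Int.mod L ((m : Int) + 1)) := by
  have hm : (0 : Int) < (m : Int) + 1 := by positivity
  have hq := PySem.Int.floordiv_mul_add_mod L ((m : Int) + 1)
  have hr0 := PySem.Int.mod_nonneg L hm
  have hr1 := PySem.Int.mod_lt L hm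
  rw [PySem.Int.neg_floordiv_neg_eq_iff_of_pos hm]
  rcases eq_or_lt_of_le hr0 with h | h
  · rw [← h, min_eq_right (by omega : (0:Int) ≤ 1)]
    constructor <;> nlinarith
  · rw [min_eq_left (by omega : (1:Int) ≤ PySem.Int.mod L ((m:Int)+1))]
    constructor <;> nlinarith

-- B's recursion computes exactly the closed-form fragment list of A's loop.
set_option maxHeartbeats 1000000 in
lemma alt_eq (m : Nat) : ∀ (flag : String),
    split_flag_alt flag ((m : Nat) : Int) =
      (List.range m).map (fun (k : Nat) =>
        PySem.Str.slice flag
          (some ((k : Int) * PySem.Int.floordiv (PySem.Str.len flag) ((m : Nat) : Int)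
                 + min (k : Int) (PySem.Int.mod (PySem.Str.len flag) ((m : Nat) : Int))))
          (some (((k : Int) + 1) * PySem.Int.floordiv (PySem.Str.len flag) ((m : Nat) : Int)
                 + min ((k : Int) + 1) (PySem.Int.mod (PySem.Str.len flag) ((m : Nat) : Int))))) := by
  induction m with
  | zero => intro flag; rw [split_flag_alt]; simp
  | succ m ih =>
    intro flag
    have hcast : ((m + 1 : Nat) : Int) = (m : Int) + 1 := by push_cast; ring
    rw [split_flag_alt]
    simp only [hcast]
    set L := PySem.Str.len flag with hLdef
    have hL : 0 ≤ L := by simp [hLdef, PySem.Str.len]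
    set q := PySem.Int.floordiv L ((m : Int) + 1) with hqdef
    set r := PySem.Int.mod L ((m : Int) + 1) with hrdef
    have hm : (0 : Int) < (m : Int) + 1 := by positivity
    have hq := PySem.Int.floordiv_mul_add_mod L ((m : Int) + 1)
    have hr0 : 0 ≤ r := PySem.Int.mod_nonneg L hm
    have hr1 : r < (m : Int) + 1 := PySem.Int.mod_lt L hm
    have hq0 : 0 ≤ q := by nlinarith
    have hc : -(PySem.Int.floordiv (-L) ((m : Int) + 1)) = q + min 1 r := ceil_div_eq L m
    have hmin01 : (0 : Int) ≤ min 1 r := le_min (by omega) hr0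
    have hc0 : (0 : Int) ≤ q + min 1 r := by omega
    have hLc : L - (q + min 1 r) = q * (m : Int) + (r - min 1 r) := by linear_combination -hq
    have hs0 : (0 : Int) ≤ r - min 1 r := by omega
    have hqm : (0 : Int) ≤ q * (m : Int) := mul_nonneg hq0 (by positivity)
    have hcle : q + min 1 r ≤ L := by linarith
    have hL' : PySem.Str.len (PySem.Str.slice flag (some (q + min 1 r)) none) = L - (q + min 1 r) := by
      simp only [PySem.Str.slice, PySem.Chars.slice, PySem.Str.len, String.toList_ofList]
      rw [PySem.List.slice_from _ hc0, List.length_drop]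
      simp only [PySem.Str.len, hLdef] at hcle hc0 ⊢
      omega
    rw [hc, if_neg (by omega : ¬((m : Int) + 1 ≤ 0)),
        show ((m : Int) + 1 - 1) = ((m : Nat) : Int) by ring,
        ih, List.range_succ_eq_map]
    simp only [List.map_cons, List.map_map, hL']
    congr 1
    · -- head fragment: flag[:c] = flag[0 : q + min 1 r]
      rw [← String.toList_inj]
      simp only [PySem.Str.slice, PySem.Chars.slice, String.toList_ofList, Nat.cast_zero]
      rw [show ((0:Int) * q + min 0 r) = 0 by rw [min_eq_left hr0]; ring,
          PySem.List.slice_zero_start]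
      congr 2
      rw [show ((0:Int) + 1) = 1 by ring]
      ring_nf
    · -- tail fragments
      by_cases hm0 : m = 0
      · subst hm0; simp
      have hm0' : (0 : Int) < (m : Int) := by exact_mod_cast Nat.pos_of_ne_zero hm0
      have hq' : PySem.Int.floordiv (L - (q + min 1 r)) (m : Int) = q := by
        rw [PySem.Int.floordiv_eq_iff_of_pos hm0', hLc]
        constructor
        · nlinarith [min_le_right (1:Int) r]
        · have hs1 : r - min 1 r < (m : Int) := by omega
          nlinarith
      have hr' : PySem.Int.mod (L - (q + min 1 r)) (m : Int) = r - min 1 r := by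
        have h := PySem.Int.floordiv_mul_add_mod (L - (q + min 1 r)) (m : Int)
        rw [hq'] at h
        linarith [hLc]
      rw [hq', hr']
      apply List.map_congr_left
      intro k hk
      have hk0 : (0 : Int) ≤ (k : Int) := Int.natCast_nonneg k
      rw [← String.toList_inj]
      simp only [PySem.Str.slice, PySem.Chars.slice, String.toList_ofList,
        Function.comp_apply, Nat.cast_succ]
      rw [slice_drop_comp _ _ _ _ hc0
            (by nlinarith [le_min hk0 hs0] : (0:Int) ≤ (k : Int) * q + min (k : Int) (r - min 1 r))
            (by nlinarith [le_min (by omega : (0:Int) ≤ (k:Int)+1) hs0] :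
               (0:Int) ≤ ((k : Int) + 1) * q + min ((k : Int) + 1) (r - min 1 r))]
      have hmin1 : min 1 r + min (k : Int) (r - min 1 r) = min ((k : Int) + 1) r := by omega
      have hmin2 : min 1 r + min ((k : Int) + 1) (r - min 1 r) = min ((k : Int) + 1 + 1) r := by omega
      congr 2
      · linear_combination hmin1
      · linear_combination hmin2

-- ===== VERDICT =====
theorem split_flag_spec : Claim_equal_split_flag := by
  intro flag n _ hn
  unfold Spec_split_flag
  rcases (by omega : n ≤ 0 ∨ 0 < n) with hle | hpos
  · rw [split_flag_alt]
    simp only [hle, if_true]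
    simp [split_flag, PySem.List.pyRange_one_eq_nil hle]
  · obtain ⟨m, rfl⟩ : ∃ m : Nat, n = (m : Int) := ⟨n.toNat, (Int.toNat_of_nonneg hpos.le).symm⟩
    have hr : 0 ≤ PySem.Int.mod (PySem.Str.len flag) (m : Int) :=
      PySem.Int.mod_nonneg _ hpos
    rw [alt_eq]
    simp only [split_flag]
    rw [PySem.List.pyRange_zero_natCast, split_flag_fold flag _ _ hr m]
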